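-- pv_equiv track=rewrite | github.com/MTLdept2026/herwanto-os | google_services.py | _assessment_label_for_column
-- ===== SOURCE A (Python) =====
-- def _assessment_label_for_column(rows: list[list[str]], header_idx: int, col_idx: int) -> str:
--     if header_idx <= 0:
--         return ""
--     upper = rows[header_idx - 1] if header_idx - 1 < len(rows) else []
--     for idx in range(min(col_idx, len(upper) - 1), -1, -1):
--         label = str(upper[idx] or "").strip()
--         if label:
--             return label
--     return ""
-- ===== SOURCE B (Python) =====
-- def _assessment_label_for_column(rows: list[list[str]], header_idx: int, col_idx: int) -> str:
--     if header_idx <= 0: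
--         return ""
--     upper = rows[header_idx - 1] if header_idx - 1 < len(rows) else []
--     b = min(col_idx, len(upper) - 1)
--     result = ""
--     for idx in range(0, b + 1):
--         label = str(upper[idx] or "").strip()
--         if label:
--             result = label
--     return result
-- ===== Notes on version B (the rewrite author's own statement) =====
-- stated objective: alternative
-- what changed: Replaces the backward scan with early return by a forward scan over the same range that overwrites an accumulator on every non-empty label, so the final value is the nearest non-empty header cell left of the column.
import Mathlib
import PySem

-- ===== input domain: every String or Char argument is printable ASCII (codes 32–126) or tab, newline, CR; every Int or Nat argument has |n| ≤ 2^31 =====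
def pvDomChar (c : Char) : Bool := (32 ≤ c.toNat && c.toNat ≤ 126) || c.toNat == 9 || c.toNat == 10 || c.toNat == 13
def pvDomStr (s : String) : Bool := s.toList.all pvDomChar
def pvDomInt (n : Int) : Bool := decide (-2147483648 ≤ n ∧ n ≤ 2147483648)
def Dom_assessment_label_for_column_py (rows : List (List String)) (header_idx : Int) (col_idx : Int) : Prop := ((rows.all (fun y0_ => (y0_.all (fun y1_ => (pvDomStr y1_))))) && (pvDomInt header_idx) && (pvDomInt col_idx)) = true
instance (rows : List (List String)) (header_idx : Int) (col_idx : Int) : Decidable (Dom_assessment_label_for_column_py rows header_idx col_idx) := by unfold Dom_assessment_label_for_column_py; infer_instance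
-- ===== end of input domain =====

-- B replaces A's backward scan with early return by a forward accumulator-overwrite scan over the same range (alternative decomposition, same cost).

-- ===== PORT A =====
-- label = str(upper[idx] or "").strip()
def pvLabelAt (upper : List String) (i : Int) : String :=
  let cell := (PySem.List.pyGet? upper i).getD ""
  PySem.Str.strip (if cell = "" then "" else cell)

-- for idx in range(b, -1, -1): processing idx = n-1 down to 0 (n = b+1); early return on non-empty label
def pvLoopA (upper : List String) : Nat → String
  | 0 => ""
  | n + 1 =>
    let label := pvLabelAt upper (n : Int)
    if label ≠ "" then label else pvLoopA upper n

def assessment_label_for_column_py (rows : List (List String)) (header_idx : Int) (col_idx : Int) : String :=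
  if header_idx ≤ 0 then ""
  else
    let upper := if header_idx - 1 < (rows.length : Int) then (PySem.List.pyGet? rows (header_idx - 1)).getD [] else []
    let b := min col_idx ((upper.length : Int) - 1)
    if b < 0 then ""  -- range(b, -1, -1) is empty
    else pvLoopA upper (b.toNat + 1)

-- ===== PORT B =====
-- forward scan over range(0, b+1), overwriting result on each non-empty label
def assessment_label_for_column_py_alt (rows : List (List String)) (header_idx : Int) (col_idx : Int) : String :=
  if header_idx ≤ 0 then ""
  else
    let upper := if header_idx - 1 < (rows.length : Int) then (PySem.List.pyGet? rows (header_idx - 1)).getD [] else []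
    let b := min col_idx ((upper.length : Int) - 1)
    if b < 0 then ""  -- range(0, b+1) is empty
    else (List.range (b.toNat + 1)).foldl
      (fun (result : String) (idx : Nat) =>
        let label := pvLabelAt upper (idx : Int)
        if label ≠ "" then label else result) ""

-- ===== PRECONDITION & SPEC =====
def Spec_assessment_label_for_column_py (rows : List (List String)) (header_idx : Int) (col_idx : Int) (out : String) : Prop := out = assessment_label_for_column_py_alt rows header_idx col_idx
instance (rows : List (List String)) (header_idx : Int) (col_idx : Int) (out : String) : Decidable (Spec_assessment_label_for_column_py rows header_idx col_idx out) := by unfold Spec_assessment_label_for_column_py; infer_instance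

-- ===== CLAIM (what is proved, stated in full; the proofs are below) =====
def Claim_equal_assessment_label_for_column_py : Prop := ∀ (rows : List (List String)) (header_idx : Int) (col_idx : Int), Dom_assessment_label_for_column_py rows header_idx col_idx → Spec_assessment_label_for_column_py rows header_idx col_idx (assessment_label_for_column_py rows header_idx col_idx)

-- ===== LEMMAS AND PROOFS =====

-- The forward overwrite fold over range n with init a computes the backward
-- first-match scan, falling back to a when no label is non-empty.
lemma foldl_range_eq_loopA (upper : List String) :
    ∀ (n : Nat) (a : String),
      (List.range n).foldl
        (fun (result : String) (idx : Nat) =>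
          let label := pvLabelAt upper (idx : Int)
          if label ≠ "" then label else result) a
      = if pvLoopA upper n = "" then a else pvLoopA upper n := by
  intro n
  induction n with
  | zero => intro a; simp [pvLoopA]
  | succ n ih =>
    intro a
    rw [List.range_succ, List.foldl_append]
    simp only [List.foldl_cons, List.foldl_nil, ih, pvLoopA]
    by_cases h : pvLabelAt upper (n : Int) = "" <;>
      by_cases h2 : pvLoopA upper n = "" <;> simp [h, h2]

-- ===== VERDICT (by name: the statement is the Claim_ definition above) =====
theorem assessment_label_for_column_py_spec : Claim_equal_assessment_label_for_column_py := by
  intro rows header_idx col_idx _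
  unfold Spec_assessment_label_for_column_py assessment_label_for_column_py assessment_label_for_column_py_alt
  by_cases h0 : header_idx ≤ 0
  · simp [h0]
  · simp only [h0, if_false]
    set upper := if header_idx - 1 < (rows.length : Int) then (PySem.List.pyGet? rows (header_idx - 1)).getD [] else [] with hupper
    set b := min col_idx ((upper.length : Int) - 1) with hb
    by_cases hbneg : b < 0
    · simp [hbneg]
    · simp only [hbneg, if_false]
      rw [foldl_range_eq_loopA]
      by_cases hz : pvLoopA upper (b.toNat + 1) = "" <;> simp [hz]
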